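-- pv_equiv track=rewrite | github.com/petar-savov/advent-of-code-2022 | day18.py | contact
-- ===== SOURCE A (Python) =====
-- def contact(a, b):
--     eq, off_by_one = 0, 0
--     for i in range(3):
--         if a[i] == b[i]:
--             eq += 1
--         elif abs(a[i] - b[i]) == 1:
--             off_by_one += 1
--
--     return eq == 2 and off_by_one == 1
-- ===== SOURCE B (Python) =====
-- def contact(a, b):
--     return sorted(abs(a[i] - b[i]) for i in range(3)) == [0, 0, 1]
-- ===== Notes on version B (the rewrite author's own statement) =====
-- stated objective: simpler
-- what changed: Replaces the two counters and if/elif branches with a one-liner comparing the sorted absolute coordinate differences against [0, 0, 1].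
import Mathlib
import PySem

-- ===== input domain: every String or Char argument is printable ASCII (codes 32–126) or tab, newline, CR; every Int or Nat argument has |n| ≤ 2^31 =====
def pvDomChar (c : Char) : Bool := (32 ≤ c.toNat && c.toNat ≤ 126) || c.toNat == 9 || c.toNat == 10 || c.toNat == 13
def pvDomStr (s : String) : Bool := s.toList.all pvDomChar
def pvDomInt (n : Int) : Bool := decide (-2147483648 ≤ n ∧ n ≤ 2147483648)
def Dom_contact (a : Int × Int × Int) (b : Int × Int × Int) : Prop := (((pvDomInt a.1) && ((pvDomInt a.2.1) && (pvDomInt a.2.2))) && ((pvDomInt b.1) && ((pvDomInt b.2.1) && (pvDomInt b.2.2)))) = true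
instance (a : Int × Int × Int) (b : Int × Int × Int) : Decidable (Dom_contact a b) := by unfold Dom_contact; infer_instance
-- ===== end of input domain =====

-- B replaces A's two counters and if/elif branches with comparing the sorted absolute
-- coordinate differences against [0, 0, 1] (objective: simpler; same behaviour, same cost).


-- tuple indexing a[i] for the 3-tuples (shared helper; i is 0, 1 or 2 in both programs)
def tget (p : Int × Int × Int) (i : Int) : Int :=
  if i = 0 then p.1 else if i = 1 then p.2.1 else p.2.2

-- ===== PORT A =====
def contact (a : Int × Int × Int) (b : Int × Int × Int) : Bool :=
  let st := (PySem.List.pyRange 0 3 1).foldl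
    (fun (s : Int × Int) i =>
      if tget a i = tget b i then (s.1 + 1, s.2)
      else if |tget a i - tget b i| = 1 then (s.1, s.2 + 1)
      else s) (0, 0)
  st.1 == 2 && st.2 == 1

-- ===== PORT B =====
def contact_alt (a : Int × Int × Int) (b : Int × Int × Int) : Bool :=
  PySem.List.sorted ((PySem.List.pyRange 0 3 1).map (fun i => |tget a i - tget b i|))
    (fun x => x) false == [0, 0, 1]

-- ===== PRECONDITION & SPEC =====
def Spec_contact (a : Int × Int × Int) (b : Int × Int × Int) (out : Bool) : Prop := out = contact_alt a b
instance (a : Int × Int × Int) (b : Int × Int × Int) (out : Bool) : Decidable (Spec_contact a b out) := by unfold Spec_contact; infer_instance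

-- ===== CLAIM (what is proved, stated in full; the proofs are below) =====
def Claim_equal_contact : Prop := ∀ (a : Int × Int × Int) (b : Int × Int × Int), Dom_contact a b → Spec_contact a b (contact a b)

-- ===== LEMMAS AND PROOFS =====

theorem absIte (x : Int) : |x| = if x < 0 then -x else x := by
  rcases lt_or_ge x 0 with h | h
  · simp [abs_of_neg h, h]
  · simp [abs_of_nonneg h, not_lt.mpr h]

theorem pyRange03 : PySem.List.pyRange 0 3 1 = [0, 1, 2] := by decide

-- ===== VERDICT (by name: the statement is the Claim_ definition above) =====
set_option maxHeartbeats 2000000 in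
theorem contact_spec : Claim_equal_contact := by
  intro a b _
  obtain ⟨x1, x2, x3⟩ := a
  obtain ⟨y1, y2, y3⟩ := b
  unfold Spec_contact contact contact_alt
  rw [pyRange03]
  simp only [List.foldl, List.map, PySem.List.sorted_eq_foldl_insertBy,
    PySem.List.insertBy, tget]
  simp only [absIte]
  norm_num
  split_ifs <;> simp_all [PySem.List.insertBy] <;> (try (split_ifs <;> simp_all)) <;> omega
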